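-- pv_equiv track=rewrite | github.com/Peter-Park95/coding_test | bfs/미로탈출.py | solution
-- ===== SOURCE A (Python) =====
-- from collections import deque
--
-- def finding(maps, start, end):
--     n, m = len(maps), len(maps[0])
--     visited = [[False] * m for _ in range(n)]
--     distance = [[0 for i in range(m)] for _ in range(n)]
--     queue = deque()
--     queue.append(start)
--     visited[start[0]][start[1]] = True
--     directions = [(-1,0), (1,0), (0, -1), (0, 1)]
--     while queue:
--         x, y = queue.popleft()
--         for dx, dy in directions:
--             nx, ny = x + dx, y + dy
--             if 0 <= nx < n and 0 <= ny < m and not visited[nx][ny]: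
--                 if maps[nx][ny] != 'X':
--                     visited[nx][ny] = True
--                     distance[nx][ny] = distance[x][y] + 1
--                     if (nx, ny) == end:
--                         return distance[nx][ny]
--                     queue.append((nx,ny))
--     return -1
--
-- def solution(maps):
--     n, m = len(maps), len(maps[0])
--     queue = deque()
--     for y in range(n):
--         for x in range(m):
--             if maps[y][x] == "S":
--                 start = (y,x)
--             elif maps[y][x] == "L":
--                 lever = (y,x)
--             elif maps[y][x] == "E":
--                 exit = (y,x)
--     start_to_lever = finding(maps, start, lever)
--     lever_to_exit= finding(maps, lever, exit)
--     if start_to_lever == -1 or lever_to_exit == -1: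
--         return -1
--     return start_to_lever + lever_to_exit
-- ===== SOURCE B (Python) =====
-- def solution(maps):
--     # One flood fill from the lever (the grid graph is undirected, so
--     # dist[S] == dist(S -> L)); read both legs from a single distance dict.
--     n, m = len(maps), len(maps[0])
--
--     pos = {}
--     for y, row in enumerate(maps):
--         for x, c in enumerate(row[:m]):
--             if c in ("S", "L", "E"):
--                 pos[c] = (y, x)
--     start, lever, exit_ = pos["S"], pos["L"], pos["E"]
--
--     dist = {lever: 0}
--     frontier = [lever]
--     while frontier:
--         nxt = []
--         for x, y in frontier:
--             base = dist[(x, y)] + 1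
--             for c in ((x - 1, y), (x + 1, y), (x, y - 1), (x, y + 1)):
--                 if 0 <= c[0] < n and 0 <= c[1] < m and c not in dist \
--                         and maps[c[0]][c[1]] != "X":
--                     dist[c] = base
--                     nxt.append(c)
--         frontier = nxt
--
--     if start not in dist or exit_ not in dist:
--         return -1
--     return dist[start] + dist[exit_]
-- ===== Notes on version B (the rewrite author's own statement) =====
-- stated objective: alternative
-- what changed: B runs ONE level-synchronous flood fill from the lever that builds a complete distance dictionary and reads both legs from it (dist[S] and dist[E], using the undirected symmetry dist(S,L)=dist(L,S)), instead of A's two separate deque BFS searches with visited/distance matrices and early return.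
import Mathlib
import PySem

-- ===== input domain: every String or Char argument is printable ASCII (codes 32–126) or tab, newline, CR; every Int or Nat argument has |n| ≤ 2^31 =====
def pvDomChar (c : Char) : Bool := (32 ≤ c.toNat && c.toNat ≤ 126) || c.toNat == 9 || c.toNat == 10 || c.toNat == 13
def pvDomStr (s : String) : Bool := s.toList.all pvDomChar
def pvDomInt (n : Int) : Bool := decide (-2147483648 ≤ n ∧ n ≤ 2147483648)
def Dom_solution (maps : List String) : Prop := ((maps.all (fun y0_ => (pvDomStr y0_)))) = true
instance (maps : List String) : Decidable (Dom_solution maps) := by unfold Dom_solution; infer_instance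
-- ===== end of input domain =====

-- B runs ONE flood fill from the lever and reads both legs from its distance table
-- (undirected symmetry), instead of A's two separate early-return BFS searches
-- (objective: alternative). Return-value equivalence only; no argument is mutated.

-- maps[i][j] (both Pythons read cells only after a 0 ≤ i < n, 0 ≤ j < m guard, so the
-- defaults of pyGetD are never used on inputs admitted by Pre_solution)
def pvCell (maps : List String) (i j : Int) : Char :=
  PySem.List.pyGetD (PySem.List.pyGetD maps i "").toList j ' '

-- ===== PORT A =====

-- visited[i][j] / distance[i][j] reads and writes (guarded in-bounds in A)
def grid2get {α : Type} (d : α) (g : List (List α)) (i j : Int) : α :=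
  PySem.List.pyGetD (PySem.List.pyGetD g i []) j d

def grid2set {α : Type} (g : List (List α)) (i j : Int) (v : α) : List (List α) :=
  PySem.List.pySetD g i (PySem.List.pySetD (PySem.List.pyGetD g i []) j v)

def directionsA : List (Int × Int) := [(-1, 0), (1, 0), (0, -1), (0, 1)]

-- the body of A's `for dx, dy in directions` loop, with Python's early `return`
-- modeled as `Sum.inr` (the remaining directions are not visited)
def innerA (maps : List String) (n m : Int) (endp : Int × Int) (x y : Int)
    (dirs : List (Int × Int)) (queue : List (Int × Int))
    (visited : List (List Bool)) (distance : List (List Int)) :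
    (List (Int × Int) × List (List Bool) × List (List Int)) ⊕ Int :=
  match dirs with
  | [] => Sum.inl (queue, visited, distance)
  | (dx, dy) :: rest =>
    let nx := x + dx
    let ny := y + dy
    if 0 ≤ nx ∧ nx < n ∧ 0 ≤ ny ∧ ny < m ∧ grid2get false visited nx ny = false then
      if pvCell maps nx ny ≠ 'X' then
        let visited' := grid2set visited nx ny true
        let dv := grid2get 0 distance x y + 1
        let distance' := grid2set distance nx ny dv
        if (nx, ny) = endp then Sum.inr dv
        else innerA maps n m endp x y rest (queue ++ [(nx, ny)]) visited' distance'
      else innerA maps n m endp x y rest queue visited distance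
    else innerA maps n m endp x y rest queue visited distance

-- A's `while queue` loop; the fuel n*m+1 bounds the number of pops (each pop after the
-- first is preceded by a fresh visited-marking, of which there are at most n*m), so the
-- fuel-out branch is never taken when called from `finding`
def findingLoop (maps : List String) (n m : Int) (endp : Int × Int) :
    Nat → List (Int × Int) → List (List Bool) → List (List Int) → Int
  | _, [], _, _ => -1
  | 0, _ :: _, _, _ => -1
  | fuel + 1, (x, y) :: rest, visited, distance =>
    match innerA maps n m endp x y directionsA rest visited distance with
    | Sum.inr v => v
    | Sum.inl (q', vis', dist') => findingLoop maps n m endp fuel q' vis' dist'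

def finding (maps : List String) (start endp : Int × Int) : Int :=
  let n : Int := maps.length
  let m : Int := ((PySem.List.pyGetD maps 0 "").toList.length : Int)
  let visited := List.replicate n.toNat (List.replicate m.toNat false)
  let distance := List.replicate n.toNat (List.replicate m.toNat (0 : Int))
  let visited := grid2set visited start.1 start.2 true
  findingLoop maps n m endp (n.toNat * m.toNat + 1) [start] visited distance

-- body of A's scan (`if c == "S": start = … elif …`), acc = (start?, lever?, exit?)
def scanStepA (acc : Option (Int × Int) × Option (Int × Int) × Option (Int × Int))
    (y x : Int) (c : Char) :
    Option (Int × Int) × Option (Int × Int) × Option (Int × Int) :=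
  if c = 'S' then (some (y, x), acc.2.1, acc.2.2)
  else if c = 'L' then (acc.1, some (y, x), acc.2.2)
  else if c = 'E' then (acc.1, acc.2.1, some (y, x))
  else acc

def scanA (maps : List String) (n m : Int) :
    Option (Int × Int) × Option (Int × Int) × Option (Int × Int) :=
  (PySem.List.pyRange 0 n 1).foldl (fun acc y =>
    (PySem.List.pyRange 0 m 1).foldl (fun acc x =>
      scanStepA acc y x (pvCell maps y x)) acc)
    (none, none, none)

def solution (maps : List String) : Int :=
  let n : Int := maps.length
  let m : Int := ((PySem.List.pyGetD maps 0 "").toList.length : Int)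
  match scanA maps n m with
  | (some start, some lever, some exitp) =>
    let s2l := finding maps start lever
    let l2e := finding maps lever exitp
    if s2l = -1 ∨ l2e = -1 then -1 else s2l + l2e
  | _ => -1  -- Python raises NameError here (no S/L/E assigned); excluded by Pre_solution

-- ===== PORT B =====

def neighborsB (x y : Int) : List (Int × Int) := [(x - 1, y), (x + 1, y), (x, y - 1), (x, y + 1)]

-- body of B's `for c in (…)` loop over the four neighbour cells
def floodCell (maps : List String) (n m base : Int)
    (st : PySem.Dict (Int × Int) Int × List (Int × Int)) (c : Int × Int) :
    PySem.Dict (Int × Int) Int × List (Int × Int) :=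
  if 0 ≤ c.1 ∧ c.1 < n ∧ 0 ≤ c.2 ∧ c.2 < m ∧ st.1.contains c = false ∧ pvCell maps c.1 c.2 ≠ 'X'
  then (st.1.insert c base, st.2 ++ [c])
  else st

-- B's `while frontier` / `for x, y in frontier` loops as one tail recursion
-- (frontier = the unprocessed part of the current level, nxt = the next level so far);
-- the fuel n*m+1 bounds the number of cells processed and is never exhausted from `flood`;
-- `dist[(x, y)]` is read as getD 0: every frontier cell is a dict key when called from `flood`
def floodLoop (maps : List String) (n m : Int) (fuel : Nat)
    (frontier nxt : List (Int × Int)) (dist : PySem.Dict (Int × Int) Int) :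
    PySem.Dict (Int × Int) Int :=
  match frontier with
  | [] =>
    match nxt with
    | [] => dist
    | q :: qs => floodLoop maps n m fuel (q :: qs) [] dist
  | (x, y) :: rest =>
    match fuel with
    | 0 => dist
    | fuel' + 1 =>
      let base := dist.getD (x, y) 0 + 1
      let st := (neighborsB x y).foldl (floodCell maps n m base) (dist, nxt)
      floodLoop maps n m fuel' rest st.2 st.1
termination_by (fuel, nxt.length)
decreasing_by
  · simp_all; omega
  · simp_all; omega

def flood (maps : List String) (n m : Int) (src : Int × Int) : PySem.Dict (Int × Int) Int :=
  floodLoop maps n m (n.toNat * m.toNat + 1) [src] [] (PySem.Dict.ofList [(src, 0)])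

-- body of B's scan: `if c in ("S", "L", "E"): pos[c] = (y, x)`
def scanStepB (pos : PySem.Dict Char (Int × Int)) (y : Int) (p : Int × Char) :
    PySem.Dict Char (Int × Int) :=
  if p.2 = 'S' ∨ p.2 = 'L' ∨ p.2 = 'E' then pos.insert p.2 (y, p.1) else pos

-- B's scan clips each row to the grid width m (`enumerate(row[:m])`)
def scanB (maps : List String) (m : Int) : PySem.Dict Char (Int × Int) :=
  (PySem.List.enumerate maps 0).foldl (fun pos yr =>
    (PySem.List.enumerate (PySem.List.slice yr.2.toList none (some m)) 0).foldl
      (fun pos p => scanStepB pos yr.1 p) pos)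
    PySem.Dict.empty

def solution_alt (maps : List String) : Int :=
  let n : Int := maps.length
  let m : Int := ((PySem.List.pyGetD maps 0 "").toList.length : Int)
  let pos := scanB maps m
  match pos.get? 'S' with
  | none => -1  -- Python raises KeyError here; excluded by Pre_solution
  | some start =>
    match pos.get? 'L' with
    | none => -1
    | some lever =>
      match pos.get? 'E' with
      | none => -1
      | some exitp =>
        let dist := flood maps n m lever
        if dist.contains start = false ∨ dist.contains exitp = false then -1
        else dist.getD start 0 + dist.getD exitp 0

-- ===== PRECONDITION & SPEC =====
-- Pre_solution = exactly the inputs where A returns normally: every row at least as long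
-- as row 0 (A's scan reads maps[y][x] for every x < len(maps[0]) and raises IndexError on
-- a shorter row; the empty map raises too), and each of S, L, E present in the first
-- len(maps[0]) columns (otherwise A raises NameError, B KeyError). Cells beyond column
-- len(maps[0]) are never read by either program.
def Pre_solution (maps : List String) : Prop :=
  maps ≠ [] ∧
  (∀ s ∈ maps, (maps.headI).toList.length ≤ s.toList.length) ∧
  'S' ∈ maps.flatMap (fun s => s.toList.take (maps.headI).toList.length) ∧
  'L' ∈ maps.flatMap (fun s => s.toList.take (maps.headI).toList.length) ∧
  'E' ∈ maps.flatMap (fun s => s.toList.take (maps.headI).toList.length)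
instance (maps : List String) : Decidable (Pre_solution maps) := by
  unfold Pre_solution; infer_instance

def pvWitness_solution : List String := ["SLE"]

def Spec_solution (maps : List String) (out : Int) : Prop := out = solution_alt maps
instance (maps : List String) (out : Int) : Decidable (Spec_solution maps out) := by
  unfold Spec_solution; infer_instance

-- ===== CLAIM (what is proved, stated in full; the proofs are below) =====
def Claim_equal_solution : Prop :=
  ∀ (maps : List String), Dom_solution maps → Pre_solution maps →
    Spec_solution maps (solution maps)

-- ===== LEMMAS AND PROOFS =====

def Inb (n m : Int) (c : Int × Int) : Prop := 0 ≤ c.1 ∧ c.1 < n ∧ 0 ≤ c.2 ∧ c.2 < m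

def Shape {α : Type} (n m : Int) (g : List (List α)) : Prop :=
  (g.length : Int) = n ∧ ∀ row ∈ g, (row.length : Int) = m

-- the lockstep invariant between A's (visited, distance) matrices and B's dict
def BfsInv (maps : List String) (n m : Int) (endp : Int × Int)
    (vis : List (List Bool)) (dmat : List (List Int))
    (dist : PySem.Dict (Int × Int) Int) : Prop :=
  Shape n m vis ∧ Shape n m dmat ∧
  (∀ c : Int × Int, Inb n m c → (grid2get false vis c.1 c.2 = true ↔ dist.contains c = true)) ∧
  (∀ (c : Int × Int) (v : Int), dist.get? c = some v →
      Inb n m c ∧ grid2get 0 dmat c.1 c.2 = v ∧ 0 ≤ v) ∧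
  dist.contains endp = false

-- A's queue = B's (frontier ++ nxt), every queued cell already has a distance
def StepRel (maps : List String) (n m : Int) (endp : Int × Int)
    (queue : List (Int × Int)) (vis : List (List Bool)) (dmat : List (List Int))
    (frontier nxt : List (Int × Int)) (dist : PySem.Dict (Int × Int) Int) : Prop :=
  queue = frontier ++ nxt ∧ BfsInv maps n m endp vis dmat dist ∧
  ∀ c ∈ queue, ∃ v, dist.get? c = some v

def pvInterp (endp : Int × Int) (d : PySem.Dict (Int × Int) Int) : Int :=
  match d.get? endp with
  | some v => v
  | none => -1

-- grid lemmas
theorem shape_set {α : Type} {n m : Int} {g : List (List α)} (hs : Shape n m g)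
    {i j : Int} (hij : Inb n m (i, j)) (v : α) : Shape n m (grid2set g i j v) := by
  obtain ⟨hlen, hrows⟩ := hs
  obtain ⟨hi0, hin, hj0, hjm⟩ := hij
  simp only at hi0 hin hj0 hjm
  have hi : i.toNat < g.length := by omega
  unfold grid2set
  rw [PySem.List.pySetD_of_nonneg _ _ hi0, PySem.List.pyGetD_eq_getElem _ _ hi0 (by omega),
    PySem.List.pySetD_of_nonneg _ _ hj0]
  refine ⟨by simpa using hlen, ?_⟩
  intro row hrow
  rcases List.mem_or_eq_of_mem_set hrow with h | h
  · exact hrows row h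
  · subst h; simpa using hrows _ (List.getElem_mem hi)

theorem grid2get_replicate {α : Type} (d x : α) {n m : Int} {c : Int × Int}
    (hn : 0 ≤ n) (hm : 0 ≤ m) (hc : Inb n m c) :
    grid2get d (List.replicate n.toNat (List.replicate m.toNat x)) c.1 c.2 = x := by
  obtain ⟨hi0, hin, hj0, hjm⟩ := hc
  unfold grid2get
  rw [PySem.List.pyGetD_eq_getElem _ _ hi0 (by simp; omega)]
  simp only [List.getElem_replicate]
  rw [PySem.List.pyGetD_eq_getElem _ _ hj0 (by simp; omega)]
  simp

theorem pyGetD_nonneg_eq {α : Type} (xs : List α) {i : Int} (d : α) (h : 0 ≤ i) :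
    PySem.List.pyGetD xs i d = (xs[i.toNat]?).getD d := by
  cases hx : xs[i.toNat]? with
  | some a =>
    obtain ⟨hb, hv⟩ := List.getElem?_eq_some_iff.mp hx
    rw [PySem.List.pyGetD_eq_getElem _ _ h (by omega)]
    simp [hv]
  | none =>
    have hb : xs.length ≤ i.toNat := by simpa using List.getElem?_eq_none_iff.mp hx
    have hnone : PySem.List.pyGet? xs i = none := by
      rw [PySem.List.pyGet?_eq_none_iff]
      intro hr
      simp only [PySem.Raise.InRange] at hr
      omega
    rw [PySem.List.pyGetD_of_none _ _ _ hnone]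
    simp

theorem grid2get_set {α : Type} (d : α) {n m : Int} {g : List (List α)} (hs : Shape n m g)
    {i j : Int} (hij : Inb n m (i, j)) {i' j' : Int} (hij' : Inb n m (i', j')) (v : α) :
    grid2get d (grid2set g i j v) i' j' =
      if i' = i ∧ j' = j then v else grid2get d g i' j' := by
  obtain ⟨hlen, hrows⟩ := hs
  obtain ⟨hi0, hin, hj0, hjm⟩ := hij
  obtain ⟨hi0', hin', hj0', hjm'⟩ := hij'
  simp only at hi0 hin hj0 hjm hi0' hin' hj0' hjm'
  have hi : i.toNat < g.length := by omega
  have hi' : i'.toNat < g.length := by omega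
  have hrl : (((g[i.toNat]?).getD []).length : Int) = m := by
    rw [List.getElem?_eq_getElem hi, Option.getD_some]
    exact hrows _ (List.getElem_mem hi)
  have hrl' : (((g[i'.toNat]?).getD []).length : Int) = m := by
    rw [List.getElem?_eq_getElem hi', Option.getD_some]
    exact hrows _ (List.getElem_mem hi')
  unfold grid2get grid2set
  rw [PySem.List.pySetD_of_nonneg _ _ hi0, PySem.List.pySetD_of_nonneg _ _ hj0,
    pyGetD_nonneg_eq _ _ hi0, pyGetD_nonneg_eq _ _ hi0', pyGetD_nonneg_eq _ _ hj0',
    pyGetD_nonneg_eq _ _ hj0']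
  by_cases hii : i' = i
  · subst hii
    rw [List.getElem?_set_self (by omega), Option.getD_some]
    by_cases hjj : j' = j
    · subst hjj
      rw [if_pos ⟨rfl, rfl⟩, List.getElem?_set_self (by omega), Option.getD_some]
    · rw [if_neg (by tauto), List.getElem?_set_ne (by omega),
        pyGetD_nonneg_eq g _ hi0']
  · rw [if_neg (by tauto), List.getElem?_set_ne (by omega),
      pyGetD_nonneg_eq g _ hi0']

-- dict value monotonicity through the flood
theorem fold_mono (maps : List String) (n m base : Int) (cs : List (Int × Int))
    (st : PySem.Dict (Int × Int) Int × List (Int × Int)) {c : Int × Int} {v : Int}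
    (h : st.1.get? c = some v) :
    ((cs.foldl (floodCell maps n m base) st).1.get? c = some v) := by
  induction cs generalizing st with
  | nil => simpa using h
  | cons c' cs ih =>
    simp only [List.foldl_cons]
    apply ih
    unfold floodCell
    split_ifs with hc
    · have hne : c ≠ c' := by
        rintro rfl
        have hcc := hc.2.2.2.2.1
        rw [PySem.Dict.contains_eq_isSome_get?, h] at hcc
        simp at hcc
      show (st.1.insert c' base).get? c = some v
      rw [PySem.Dict.get?_insert, if_neg hne]
      exact h
    · exact h

theorem loop_mono (maps : List String) (n m : Int) (fuel : Nat)
    (frontier nxt : List (Int × Int)) (dist : PySem.Dict (Int × Int) Int)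
    {c : Int × Int} {v : Int} (h : dist.get? c = some v) :
    (floodLoop maps n m fuel frontier nxt dist).get? c = some v := by
  revert h
  induction fuel, frontier, nxt, dist using floodLoop.induct maps n m with
  | case1 fuel dist => intro h; rw [floodLoop]; exact h
  | case2 fuel dist q qs ih =>
    intro h
    rw [floodLoop]
    exact ih h
  | case3 nxt dist x y rest =>
    intro h
    rw [floodLoop]
    exact h
  | case4 =>
    rename_i nxt dist x y rest fuel' base st ih
    intro h
    rw [floodLoop]
    exact ih (fold_mono _ _ _ _ _ _ h)

-- the four neighbour cells are the four direction offsets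
theorem neighborsB_eq (x y : Int) :
    neighborsB x y = directionsA.map (fun d => (x + d.1, y + d.2)) := by
  norm_num [neighborsB, directionsA, Prod.ext_iff]
  omega

-- one popped cell: A's direction loop vs B's neighbour fold
theorem inner_sim (maps : List String) (n m : Int) (endp : Int × Int) (x y : Int) (w : Int)
    (dirs : List (Int × Int)) (hdirs : ∀ d ∈ dirs, ¬(d.1 = 0 ∧ d.2 = 0)) :
    ∀ (Q N : List (Int × Int)) (vis : List (List Bool)) (dmat : List (List Int))
      (dist : PySem.Dict (Int × Int) Int),
      BfsInv maps n m endp vis dmat dist →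
      dist.get? (x, y) = some w →
      (match innerA maps n m endp x y dirs Q vis dmat with
       | Sum.inr v =>
         ((dirs.map (fun d => (x + d.1, y + d.2))).foldl
             (floodCell maps n m (w + 1)) (dist, N)).1.get? endp = some v
       | Sum.inl (Q', vis', dmat') =>
         let st := (dirs.map (fun d => (x + d.1, y + d.2))).foldl
             (floodCell maps n m (w + 1)) (dist, N)
         BfsInv maps n m endp vis' dmat' st.1 ∧ st.1.get? (x, y) = some w ∧
         ∃ Δ, Q' = Q ++ Δ ∧ st.2 = N ++ Δ ∧
           (∀ c ∈ Δ, ∃ u, st.1.get? c = some u) ∧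
           (∀ (c : Int × Int) (v : Int), dist.get? c = some v → st.1.get? c = some v)) := by
  induction dirs with
  | nil =>
    intro Q N vis dmat dist hInv hxy
    simp only [innerA, List.map_nil, List.foldl_nil]
    exact ⟨hInv, hxy, ⟨[], by simp, by simp, by simp, fun c v h => h⟩⟩
  | cons d0 rest ih =>
    obtain ⟨dx, dy⟩ := d0
    intro Q N vis dmat dist hInv hxy
    have hd0 : ¬(dx = 0 ∧ dy = 0) := by
      have := hdirs (dx, dy) (by simp)
      simpa using this
    have hrest : ∀ d ∈ rest, ¬(d.1 = 0 ∧ d.2 = 0) := fun d hd => hdirs d (by simp [hd])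
    have ih' := ih hrest
    have hne_xy : (x + dx, y + dy) ≠ (x, y) := by
      intro hc
      rw [Prod.mk.injEq] at hc
      exact hd0 ⟨by omega, by omega⟩
    simp only [innerA, List.map_cons, List.foldl_cons, floodCell]
    by_cases hb : 0 ≤ x + dx ∧ x + dx < n ∧ 0 ≤ y + dy ∧ y + dy < m
    · have hInb : Inb n m (x + dx, y + dy) := ⟨hb.1, hb.2.1, hb.2.2.1, hb.2.2.2⟩
      by_cases hvis : dist.contains (x + dx, y + dy) = true
      · have hgvis : grid2get false vis (x + dx) (y + dy) = true :=
          (hInv.2.2.1 _ hInb).mpr hvis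
        rw [if_neg (by simp [hgvis]), if_neg (by simp [hvis])]
        exact ih' Q N vis dmat dist hInv hxy
      · have hcontf : dist.contains (x + dx, y + dy) = false := by
          simpa using hvis
        have hgvisf : grid2get false vis (x + dx) (y + dy) = false := by
          have hiff := hInv.2.2.1 _ hInb
          cases hgv : grid2get false vis (x + dx) (y + dy) with
          | false => rfl
          | true => rw [hiff.mp hgv] at hcontf; exact Bool.noConfusion hcontf
        by_cases hX : pvCell maps (x + dx) (y + dy) = 'X'
        · rw [if_pos ⟨hb.1, hb.2.1, hb.2.2.1, hb.2.2.2, hgvisf⟩,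
            if_neg (by simpa using hX), if_neg (by simp [hX])]
          exact ih' Q N vis dmat dist hInv hxy
        · have hdm := hInv.2.2.2.1 _ _ hxy
          have hw : grid2get 0 dmat x y = w := hdm.2.1
          have hw0 : 0 ≤ w := hdm.2.2
          rw [if_pos ⟨hb.1, hb.2.1, hb.2.2.1, hb.2.2.2, hgvisf⟩,
            if_pos (by simpa using hX),
            if_pos (⟨hb.1, hb.2.1, hb.2.2.1, hb.2.2.2, hcontf, hX⟩ :
              0 ≤ x + dx ∧ x + dx < n ∧ 0 ≤ y + dy ∧ y + dy < m ∧
                dist.contains (x + dx, y + dy) = false ∧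
                pvCell maps (x + dx) (y + dy) ≠ 'X'), hw]
          have hget_new : (dist.insert (x + dx, y + dy) (w + 1)).get? (x + dx, y + dy)
              = some (w + 1) := by
            rw [PySem.Dict.get?_insert, if_pos rfl]
          by_cases hendq : (x + dx, y + dy) = endp
          · rw [if_pos hendq]
            show ((rest.map fun d => (x + d.1, y + d.2)).foldl (floodCell maps n m (w + 1))
              (dist.insert (x + dx, y + dy) (w + 1), N ++ [(x + dx, y + dy)])).1.get? endp
              = some (w + 1)
            apply fold_mono
            rw [← hendq]
            exact hget_new
          · rw [if_neg hendq]
            -- the new lockstep state after this neighbour fires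
            have hInv' : BfsInv maps n m endp (grid2set vis (x + dx) (y + dy) true)
                (grid2set dmat (x + dx) (y + dy) (w + 1))
                (dist.insert (x + dx, y + dy) (w + 1)) := by
              obtain ⟨hshv, hshd, hvc, hgv, hendf⟩ := hInv
              refine ⟨shape_set hshv hInb true, shape_set hshd hInb (w + 1), ?_, ?_, ?_⟩
              · intro c hc
                rw [grid2get_set false hshv hInb hc true,
                  PySem.Dict.contains_insert]
                by_cases hcc : c = (x + dx, y + dy)
                · rw [if_pos (by rw [hcc]; exact ⟨rfl, rfl⟩), hcc]
                  simp
                · rw [if_neg (by rw [Prod.ext_iff] at hcc; tauto)]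
                  have hbeq : (c == (x + dx, y + dy)) = false := by
                    simpa using hcc
                  rw [hbeq]
                  simpa using hvc c hc
              · intro c v hcv
                rw [PySem.Dict.get?_insert] at hcv
                split_ifs at hcv with hcc
                · cases hcv
                  subst hcc
                  refine ⟨hInb, ?_, by omega⟩
                  rw [grid2get_set 0 hshd hInb hInb (w + 1), if_pos ⟨rfl, rfl⟩]
                · have hold := hgv _ _ hcv
                  refine ⟨hold.1, ?_, hold.2.2⟩
                  rw [grid2get_set 0 hshd hInb hold.1 (w + 1),
                    if_neg (by rw [Prod.ext_iff] at hcc; tauto)]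
                  exact hold.2.1
              · rw [PySem.Dict.contains_insert]
                have hbeq : (endp == (x + dx, y + dy)) = false := by
                  simp only [beq_eq_false_iff_ne, ne_eq]
                  intro hc
                  exact hendq hc.symm
                rw [hbeq]
                simpa using hendf
            have hxy' : (dist.insert (x + dx, y + dy) (w + 1)).get? (x, y) = some w := by
              rw [PySem.Dict.get?_insert, if_neg hne_xy.symm]
              exact hxy
            have H := ih' (Q ++ [(x + dx, y + dy)]) (N ++ [(x + dx, y + dy)])
              (grid2set vis (x + dx) (y + dy) true)
              (grid2set dmat (x + dx) (y + dy) (w + 1))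
              (dist.insert (x + dx, y + dy) (w + 1)) hInv' hxy'
            revert H
            cases hres : innerA maps n m endp x y rest (Q ++ [(x + dx, y + dy)])
              (grid2set vis (x + dx) (y + dy) true)
              (grid2set dmat (x + dx) (y + dy) (w + 1)) with
            | inr v => intro H; exact H
            | inl s3 =>
              obtain ⟨Q'', vis'', dmat''⟩ := s3
              intro H
              obtain ⟨hInv'', hxy'', Δ', hQ, hN, hΔmem, hmono⟩ := H
              refine ⟨hInv'', hxy'', (x + dx, y + dy) :: Δ', ?_, ?_, ?_, ?_⟩
              · rw [hQ]; simp
              · rw [hN]; simp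
              · intro c hc
                rcases List.mem_cons.mp hc with hc | hc
                · subst hc
                  exact ⟨w + 1, hmono _ _ hget_new⟩
                · exact hΔmem c hc
              · intro c v hcv
                apply hmono
                rw [PySem.Dict.get?_insert]
                rw [if_neg ?_]
                · exact hcv
                · rintro rfl
                  rw [PySem.Dict.contains_eq_isSome_get?, hcv] at hcontf
                  simp at hcontf
    · rw [if_neg (by tauto), if_neg (by tauto)]
      exact ih' Q N vis dmat dist hInv hxy

theorem endp_none {maps : List String} {n m : Int} {endp : Int × Int}
    {vis : List (List Bool)} {dmat : List (List Int)} {dist : PySem.Dict (Int × Int) Int}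
    (hInv : BfsInv maps n m endp vis dmat dist) : dist.get? endp = none := by
  have h5 := hInv.2.2.2.2
  rw [PySem.Dict.contains_eq_isSome_get?] at h5
  cases hcase : dist.get? endp with
  | none => rfl
  | some v => rw [hcase] at h5; simp at h5

-- one pop of A's deque = one frontier cell of B (given the simulation for smaller fuel)
theorem pop_step (maps : List String) (n m : Int) (endp : Int × Int) (fuel : Nat)
    (IH : ∀ (queue : List (Int × Int)) (vis : List (List Bool)) (dmat : List (List Int))
      (frontier nxt : List (Int × Int)) (dist : PySem.Dict (Int × Int) Int),
      StepRel maps n m endp queue vis dmat frontier nxt dist →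
      findingLoop maps n m endp fuel queue vis dmat =
        pvInterp endp (floodLoop maps n m fuel frontier nxt dist)) :
    ∀ (x y : Int) (queue' restF nxt : List (Int × Int)) (vis : List (List Bool))
      (dmat : List (List Int)) (dist : PySem.Dict (Int × Int) Int),
      StepRel maps n m endp ((x, y) :: queue') vis dmat ((x, y) :: restF) nxt dist →
      findingLoop maps n m endp (fuel + 1) ((x, y) :: queue') vis dmat =
        pvInterp endp (floodLoop maps n m (fuel + 1) ((x, y) :: restF) nxt dist) := by
  intro x y queue' restF nxt vis dmat dist hR
  obtain ⟨hq, hInv, hmem⟩ := hR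
  have hq' : queue' = restF ++ nxt := by simpa using hq
  obtain ⟨w, hxy⟩ := hmem (x, y) (by simp)
  have hbase : dist.getD (x, y) 0 = w := by
    rw [PySem.Dict.getD_eq_get?_getD, hxy]; rfl
  rw [findingLoop, floodLoop]
  simp only [hbase, neighborsB_eq x y]
  have H := inner_sim maps n m endp x y w directionsA (by decide) queue' nxt vis dmat dist
    hInv hxy
  revert H
  cases hres : innerA maps n m endp x y directionsA queue' vis dmat with
  | inr v =>
    intro H
    dsimp only at H
    have hfin := loop_mono maps n m fuel restF
      (List.foldl (floodCell maps n m (w + 1)) (dist, nxt)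
        (List.map (fun d => (x + d.1, y + d.2)) directionsA)).2
      (List.foldl (floodCell maps n m (w + 1)) (dist, nxt)
        (List.map (fun d => (x + d.1, y + d.2)) directionsA)).1 H
    rw [pvInterp, hfin]
  | inl s3 =>
    obtain ⟨Q', vis', dmat'⟩ := s3
    intro H
    dsimp only at H
    obtain ⟨hInv', hxy', Δ, hQ, hN, hΔ, hmono⟩ := H
    apply IH
    refine ⟨?_, hInv', ?_⟩
    · rw [hQ, hq', hN, List.append_assoc]
    · intro c hc
      rw [hQ] at hc
      rcases List.mem_append.mp hc with hc | hc
      · obtain ⟨v, hv⟩ := hmem c (List.mem_cons_of_mem _ hc)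
        exact ⟨v, hmono _ _ hv⟩
      · exact hΔ c hc

-- the main lockstep simulation
theorem bfs_sim (maps : List String) (n m : Int) (endp : Int × Int) :
    ∀ (fuel : Nat) (queue : List (Int × Int)) (vis : List (List Bool))
      (dmat : List (List Int)) (frontier nxt : List (Int × Int))
      (dist : PySem.Dict (Int × Int) Int),
      StepRel maps n m endp queue vis dmat frontier nxt dist →
      findingLoop maps n m endp fuel queue vis dmat =
        pvInterp endp (floodLoop maps n m fuel frontier nxt dist) := by
  intro fuel
  induction fuel with
  | zero =>
    intro queue vis dmat frontier nxt dist hR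
    obtain ⟨hq, hInv, hmem⟩ := hR
    subst hq
    have hInterp : pvInterp endp dist = -1 := by rw [pvInterp, endp_none hInv]
    cases frontier with
    | nil =>
      cases nxt with
      | nil => rw [floodLoop, hInterp]; rfl
      | cons q qs =>
        obtain ⟨qx, qy⟩ := q
        rw [floodLoop, floodLoop, hInterp]
        rfl
    | cons c restF =>
      obtain ⟨cx, cy⟩ := c
      rw [floodLoop, hInterp]
      rfl
  | succ fuel IH =>
    intro queue vis dmat frontier nxt dist hR
    have hq := hR.1
    subst hq
    cases frontier with
    | nil =>
      cases nxt with
      | nil =>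
        rw [floodLoop, pvInterp, endp_none hR.2.1]
        rfl
      | cons q qs =>
        obtain ⟨qx, qy⟩ := q
        rw [show floodLoop maps n m (fuel + 1) [] ((qx, qy) :: qs) dist =
          floodLoop maps n m (fuel + 1) ((qx, qy) :: qs) [] dist from by rw [floodLoop]]
        refine pop_step maps n m endp fuel IH qx qy qs qs [] vis dmat dist ?_
        obtain ⟨-, hInv, hmem⟩ := hR
        exact ⟨by simp, hInv, by simpa using hmem⟩
    | cons c restF =>
      obtain ⟨cx, cy⟩ := c
      refine pop_step maps n m endp fuel IH cx cy (restF ++ nxt) restF nxt vis dmat dist ?_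
      obtain ⟨-, hInv, hmem⟩ := hR
      exact ⟨rfl, hInv, by simpa using hmem⟩

-- finding = flood + lookup
theorem finding_eq_flood (maps : List String) (s endp : Int × Int)
    (hs : Inb (maps.length : Int) ((PySem.List.pyGetD maps 0 "").toList.length : Int) s)
    (hne : endp ≠ s) :
    finding maps s endp =
      pvInterp endp (flood maps (maps.length : Int)
        ((PySem.List.pyGetD maps 0 "").toList.length : Int) s) := by
  unfold finding flood
  apply bfs_sim
  have h0 : PySem.Dict.ofList [(s, (0 : Int))] = PySem.Dict.empty.insert s 0 := rfl
  have hrep : ∀ {α : Type} (x : α), Shape (maps.length : Int)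
      ((PySem.List.pyGetD maps 0 "").toList.length : Int)
      (List.replicate (maps.length : Int).toNat
        (List.replicate ((PySem.List.pyGetD maps 0 "").toList.length : Int).toNat x)) := by
    intro α x
    refine ⟨by simp, ?_⟩
    intro row hrow
    rw [List.eq_of_mem_replicate hrow]
    simp
  refine ⟨by simp, ⟨shape_set (hrep false) hs true, hrep 0, ?_, ?_, ?_⟩, ?_⟩
  · intro c hc
    rw [grid2get_set false (hrep false) hs hc true, h0, PySem.Dict.contains_insert]
    by_cases hcs : c = s
    · rw [if_pos (by rw [hcs]; exact ⟨rfl, rfl⟩), hcs]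
      simp
    · rw [if_neg (by rw [show s = (s.1, s.2) from rfl, Prod.ext_iff] at hcs; tauto)]
      have hbeq : (c == s) = false := by simpa using hcs
      rw [hbeq, PySem.Dict.contains_empty]
      rw [grid2get_replicate false false (Int.natCast_nonneg _) (Int.natCast_nonneg _) hc]
      simp
  · intro c v hv
    rw [h0, PySem.Dict.get?_insert] at hv
    split_ifs at hv with hcs
    · cases hv
      subst hcs
      exact ⟨hs, grid2get_replicate 0 0 (Int.natCast_nonneg _) (Int.natCast_nonneg _) hs,
        le_refl 0⟩
    · rw [PySem.Dict.get?_empty] at hv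
      exact absurd hv (by simp)
  · rw [h0, PySem.Dict.contains_insert]
    have hbeq : (endp == s) = false := by simpa using hne
    rw [hbeq, PySem.Dict.contains_empty]
    rfl
  · intro c hc
    have hcs : c = s := by simpa using hc
    subst hcs
    refine ⟨0, ?_⟩
    rw [h0, PySem.Dict.get?_insert, if_pos rfl]

-- scan correspondence
def ScanRel (acc : Option (Int × Int) × Option (Int × Int) × Option (Int × Int))
    (pos : PySem.Dict Char (Int × Int)) : Prop :=
  pos.get? 'S' = acc.1 ∧ pos.get? 'L' = acc.2.1 ∧ pos.get? 'E' = acc.2.2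

def ScanGood (maps : List String) (n m : Int)
    (acc : Option (Int × Int) × Option (Int × Int) × Option (Int × Int)) : Prop :=
  (∀ p, acc.1 = some p → Inb n m p ∧ pvCell maps p.1 p.2 = 'S') ∧
  (∀ p, acc.2.1 = some p → Inb n m p ∧ pvCell maps p.1 p.2 = 'L') ∧
  (∀ p, acc.2.2 = some p → Inb n m p ∧ pvCell maps p.1 p.2 = 'E')

theorem foldl_rel {α β γ : Type} (R : α → β → Prop) (l : List γ) (f : α → γ → α)
    (g : β → γ → β) (hstep : ∀ c ∈ l, ∀ a b, R a b → R (f a c) (g b c)) :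
    ∀ a b, R a b → R (l.foldl f a) (l.foldl g b) := by
  induction l with
  | nil => intro a b h; simpa using h
  | cons c cs ih =>
    intro a b h
    simp only [List.foldl_cons]
    exact ih (fun c' hc' => hstep c' (List.mem_cons_of_mem _ hc')) _ _
      (hstep c (by simp) a b h)

theorem scan_cell_step (maps : List String) (n m : Int) (j xx : Int)
    (hj : 0 ≤ j ∧ j < n) (hx : 0 ≤ xx ∧ xx < m)
    (a : Option (Int × Int) × Option (Int × Int) × Option (Int × Int))
    (b : PySem.Dict Char (Int × Int)) (hR : ScanRel a b ∧ ScanGood maps n m a) :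
    ScanRel (scanStepA a j xx (pvCell maps j xx)) (scanStepB b j (xx, pvCell maps j xx)) ∧
      ScanGood maps n m (scanStepA a j xx (pvCell maps j xx)) := by
  obtain ⟨⟨hS, hL, hE⟩, hGS, hGL, hGE⟩ := hR
  have hInb : Inb n m (j, xx) := ⟨hj.1, hj.2, hx.1, hx.2⟩
  unfold scanStepA scanStepB ScanRel ScanGood
  by_cases h1 : pvCell maps j xx = 'S'
  · rw [if_pos h1, if_pos (Or.inl h1), h1]
    refine ⟨⟨?_, ?_, ?_⟩, ?_, ?_, ?_⟩
    · rw [PySem.Dict.get?_insert, if_pos rfl]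
    · rw [PySem.Dict.get?_insert, if_neg (by simp)]; exact hL
    · rw [PySem.Dict.get?_insert, if_neg (by simp)]; exact hE
    · intro p hp
      cases hp
      exact ⟨hInb, h1⟩
    · exact hGL
    · exact hGE
  · by_cases h2 : pvCell maps j xx = 'L'
    · rw [if_neg h1, if_pos h2, if_pos (Or.inr (Or.inl h2)), h2]
      refine ⟨⟨?_, ?_, ?_⟩, ?_, ?_, ?_⟩
      · rw [PySem.Dict.get?_insert, if_neg (by simp)]; exact hS
      · rw [PySem.Dict.get?_insert, if_pos rfl]
      · rw [PySem.Dict.get?_insert, if_neg (by simp)]; exact hE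
      · exact hGS
      · intro p hp
        cases hp
        exact ⟨hInb, h2⟩
      · exact hGE
    · by_cases h3 : pvCell maps j xx = 'E'
      · rw [if_neg h1, if_neg h2, if_pos h3, if_pos (Or.inr (Or.inr h3)), h3]
        refine ⟨⟨?_, ?_, ?_⟩, ?_, ?_, ?_⟩
        · rw [PySem.Dict.get?_insert, if_neg (by simp)]; exact hS
        · rw [PySem.Dict.get?_insert, if_neg (by simp)]; exact hL
        · rw [PySem.Dict.get?_insert, if_pos rfl]
        · exact hGS
        · exact hGL
        · intro p hp
          cases hp
          exact ⟨hInb, h3⟩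
      · rw [if_neg h1, if_neg h2, if_neg h3, if_neg (by tauto)]
        exact ⟨⟨hS, hL, hE⟩, hGS, hGL, hGE⟩

theorem scan_sim (maps : List String)
    (hlong : ∀ s ∈ maps, (maps.headI).toList.length ≤ s.toList.length) :
    ScanRel (scanA maps (maps.length : Int) ((PySem.List.pyGetD maps 0 "").toList.length : Int))
        (scanB maps ((PySem.List.pyGetD maps 0 "").toList.length : Int)) ∧
      ScanGood maps (maps.length : Int) ((PySem.List.pyGetD maps 0 "").toList.length : Int)
        (scanA maps (maps.length : Int) ((PySem.List.pyGetD maps 0 "").toList.length : Int)) := by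
  unfold scanA scanB
  rw [PySem.List.enumerate_eq_map_pyRange maps "", List.foldl_map, PySem.List.len_eq]
  refine foldl_rel
    (fun acc pos => ScanRel acc pos ∧
      ScanGood maps (maps.length : Int) ((PySem.List.pyGetD maps 0 "").toList.length : Int) acc)
    _ _ _ ?_ _ _ ?_
  · intro j hj a b hR
    obtain ⟨hj0, hjn⟩ := PySem.List.mem_pyRange_one.mp hj
    have hmapsne : maps ≠ [] := by
      intro hc
      subst hc
      simp at hjn
      omega
    have hmem : PySem.List.pyGetD maps j "" ∈ maps :=
      PySem.List.pyGetD_mem maps "" (by simp only [PySem.Raise.InRange]; omega)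
    have hhead : PySem.List.pyGetD maps 0 "" = maps.headI := by
      cases maps with
      | nil => exact absurd rfl hmapsne
      | cons r rs => rw [PySem.List.pyGetD_zero_cons]; rfl
    have hrowlen : (PySem.List.pyGetD maps 0 "").toList.length
        ≤ (PySem.List.pyGetD maps j "").toList.length := by
      rw [hhead]
      exact hlong _ hmem
    have hsl : PySem.List.slice (PySem.List.pyGetD maps j "").toList none
        (some ((PySem.List.pyGetD maps 0 "").toList.length : Int))
        = (PySem.List.pyGetD maps j "").toList.take
            ((PySem.List.pyGetD maps 0 "").toList.length : Int).toNat := by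
      rw [PySem.List.slice_to]
      exact Int.natCast_nonneg _
    have hslen : ((PySem.List.slice (PySem.List.pyGetD maps j "").toList none
        (some ((PySem.List.pyGetD maps 0 "").toList.length : Int))).length : Int)
        = ((PySem.List.pyGetD maps 0 "").toList.length : Int) := by
      rw [hsl, List.length_take]
      simp only [Int.toNat_natCast]
      omega
    rw [PySem.List.enumerate_eq_map_pyRange
        (PySem.List.slice (PySem.List.pyGetD maps j "").toList none
          (some ((PySem.List.pyGetD maps 0 "").toList.length : Int))) ' ',
      List.foldl_map, PySem.List.len_eq, hslen]
    refine foldl_rel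
      (fun acc pos => ScanRel acc pos ∧
        ScanGood maps (maps.length : Int)
          ((PySem.List.pyGetD maps 0 "").toList.length : Int) acc) _ _ _ ?_ a b hR
    intro xx hx a' b' hR'
    obtain ⟨hx0, hxm⟩ := PySem.List.mem_pyRange_one.mp hx
    have hcell : PySem.List.pyGetD (PySem.List.slice (PySem.List.pyGetD maps j "").toList none
        (some ((PySem.List.pyGetD maps 0 "").toList.length : Int))) xx ' '
        = pvCell maps j xx := by
      have hxb : xx < ((PySem.List.slice (PySem.List.pyGetD maps j "").toList none
          (some ((PySem.List.pyGetD maps 0 "").toList.length : Int))).length : Int) := by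
        omega
      rw [PySem.List.pyGetD_eq_getElem _ _ hx0 hxb]
      rw [List.getElem_of_eq hsl]
      rw [List.getElem_take]
      unfold pvCell
      rw [PySem.List.pyGetD_eq_getElem _ _ hx0 (by omega)]
    rw [hcell]
    exact scan_cell_step maps _ _ j xx ⟨hj0, hjn⟩ ⟨hx0, hxm⟩ a' b' hR'
  · refine ⟨⟨?_, ?_, ?_⟩, ?_, ?_, ?_⟩ <;>
      simp [PySem.Dict.get?_empty]

-- ===== the BFS-distance theory for B's single flood =====

-- one BFS edge: c is a neighbour of b, in bounds and not a wall
def adjE (maps : List String) (n m : Int) (b c : Int × Int) : Prop :=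
  c ∈ neighborsB b.1 b.2 ∧ Inb n m c ∧ pvCell maps c.1 c.2 ≠ 'X'

-- a walk of length k from src
inductive Reach (maps : List String) (n m : Int) (src : Int × Int) : Nat → (Int × Int) → Prop where
  | zero : Reach maps n m src 0 src
  | succ {k : Nat} {b c : Int × Int} :
      Reach maps n m src k b → adjE maps n m b c → Reach maps n m src (k + 1) c

-- k is THE BFS distance of c from src
def MR (maps : List String) (n m : Int) (src c : Int × Int) (k : Nat) : Prop :=
  Reach maps n m src k c ∧ ∀ j, Reach maps n m src j c → k ≤ j

theorem reach_zero {maps : List String} {n m : Int} {src c : Int × Int}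
    (h : Reach maps n m src 0 c) : c = src := by
  cases h; rfl

theorem reach_trans {maps : List String} {n m : Int} {a b c : Int × Int} {i j : Nat}
    (h1 : Reach maps n m a i b) (h2 : Reach maps n m b j c) :
    Reach maps n m a (i + j) c := by
  induction h2 with
  | zero => exact h1
  | succ hr he ih => exact Reach.succ ih he

theorem reach_target {maps : List String} {n m : Int} {src c : Int × Int} {k : Nat}
    (h : Reach maps n m src k c) :
    c = src ∨ (Inb n m c ∧ pvCell maps c.1 c.2 ≠ 'X') := by
  cases h with
  | zero => exact Or.inl rfl
  | succ hr he => exact Or.inr ⟨he.2.1, he.2.2⟩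

theorem neighbors_symm {b c : Int × Int} (h : c ∈ neighborsB b.1 b.2) :
    b ∈ neighborsB c.1 c.2 := by
  obtain ⟨bx, by'⟩ := b
  obtain ⟨cx, cy⟩ := c
  simp only [neighborsB, List.mem_cons, List.not_mem_nil, or_false, Prod.mk.injEq] at h ⊢
  omega

theorem reach_symm {maps : List String} {n m : Int} {src c : Int × Int} {k : Nat}
    (hsrc : Inb n m src ∧ pvCell maps src.1 src.2 ≠ 'X')
    (h : Reach maps n m src k c) : Reach maps n m c k src := by
  induction h with
  | zero => exact Reach.zero
  | @succ k b c hr he ih =>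
    have hb : Inb n m b ∧ pvCell maps b.1 b.2 ≠ 'X' := by
      rcases reach_target hr with h | h
      · rw [h]; exact hsrc
      · exact h
    have hone : Reach maps n m c 1 b :=
      Reach.succ Reach.zero ⟨neighbors_symm he.1, hb.1, hb.2⟩
    have := reach_trans hone ih
    simpa [Nat.add_comm] using this

theorem MR_unique {maps : List String} {n m : Int} {src c : Int × Int} {k k' : Nat}
    (h : MR maps n m src c k) (h' : MR maps n m src c k') : k = k' :=
  Nat.le_antisymm (h.2 _ h'.1) (h'.2 _ h.1)

theorem exists_MR_of_reach {maps : List String} {n m : Int} {src c : Int × Int} :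
    ∀ {j : Nat}, Reach maps n m src j c → ∃ k, k ≤ j ∧ MR maps n m src c k := by
  intro j
  induction j using Nat.strong_induction_on with
  | _ j ih =>
    intro h
    by_cases hmin : ∀ j' < j, ¬ Reach maps n m src j' c
    · exact ⟨j, le_refl j, h, fun i hi => by
        by_contra hlt
        exact hmin i (by omega) hi⟩
    · push_neg at hmin
      obtain ⟨j', hj', hr⟩ := hmin
      obtain ⟨k, hk, hmr⟩ := ih j' hj' hr
      exact ⟨k, by omega, hmr⟩

theorem MR_symm {maps : List String} {n m : Int} {src c : Int × Int} {k : Nat}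
    (hsrc : Inb n m src ∧ pvCell maps src.1 src.2 ≠ 'X')
    (hc : Inb n m c ∧ pvCell maps c.1 c.2 ≠ 'X')
    (h : MR maps n m src c k) : MR maps n m c src k :=
  ⟨reach_symm hsrc h.1, fun j hj => h.2 j (reach_symm hc hj)⟩

theorem MR_pred {maps : List String} {n m : Int} {src c : Int × Int} {k : Nat}
    (h : MR maps n m src c (k + 1)) :
    ∃ b, adjE maps n m b c ∧ MR maps n m src b k := by
  obtain ⟨hr, hmin⟩ := h
  cases hr with
  | @succ _ b _ hrb he =>
    refine ⟨b, he, hrb, fun j hj => ?_⟩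
    by_contra hlt
    have : Reach maps n m src (j + 1) c := Reach.succ hj he
    have := hmin _ this
    omega

theorem MR_inb {maps : List String} {n m : Int} {src c : Int × Int} {k : Nat}
    (hsrc : Inb n m src) (h : MR maps n m src c k) : Inb n m c := by
  rcases reach_target h.1 with hh | hh
  · rw [hh]; exact hsrc
  · exact hh.1

-- at most n*m distinct in-bounds cells
theorem nodup_inb_length_le (n m : Int) (l : List (Int × Int)) (hnd : l.Nodup)
    (h : ∀ c ∈ l, Inb n m c) : l.length ≤ n.toNat * m.toNat := by
  have h1 : l.length = l.toFinset.card := (List.toFinset_card_of_nodup hnd).symm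
  have h2 : l.toFinset ⊆ Finset.Icc (0 : Int) (n - 1) ×ˢ Finset.Icc (0 : Int) (m - 1) := by
    intro c hc
    obtain ⟨a, b, cc, dd⟩ := h c (List.mem_toFinset.mp hc)
    rw [Finset.mem_product, Finset.mem_Icc, Finset.mem_Icc]
    omega
  have h3 := Finset.card_le_card h2
  rw [Finset.card_product, Int.card_Icc, Int.card_Icc] at h3
  have e1 : (n - 1 + 1 - 0 : Int).toNat = n.toNat := by omega
  have e2 : (m - 1 + 1 - 0 : Int).toNat = m.toNat := by omega
  rw [e1, e2] at h3
  rw [h1]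
  exact h3

-- the flood-fill invariant: level d is being processed
def FInv (maps : List String) (n m : Int) (src : Int × Int) (d : Nat)
    (frontier nxt : List (Int × Int)) (dist : PySem.Dict (Int × Int) Int) : Prop :=
  (∀ c ∈ frontier, dist.get? c = some (d : Int) ∧ MR maps n m src c d) ∧
  (∀ c ∈ nxt, dist.get? c = some ((d : Int) + 1) ∧ MR maps n m src c (d + 1)) ∧
  (∀ c v, dist.get? c = some v → ∃ k, k ≤ d + 1 ∧ v = (k : Int) ∧ MR maps n m src c k) ∧
  (∀ c, dist.get? c = some ((d : Int) + 1) → c ∈ nxt) ∧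
  (∀ c k, MR maps n m src c k → k ≤ d → dist.contains c = true) ∧
  (∀ c, MR maps n m src c (d + 1) → c ∈ nxt ∨ ∃ b ∈ frontier, adjE maps n m b c) ∧
  dist.keys.Nodup

theorem fold_contains_mono (maps : List String) (n m base : Int) (cs : List (Int × Int))
    (st : PySem.Dict (Int × Int) Int × List (Int × Int)) {c : Int × Int}
    (h : st.1.contains c = true) :
    ((cs.foldl (floodCell maps n m base) st).1.contains c = true) := by
  rw [PySem.Dict.contains_eq_isSome_get?] at h
  cases hg : st.1.get? c with
  | none => rw [hg] at h; simp at h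
  | some v =>
    rw [PySem.Dict.contains_eq_isSome_get?, fold_mono maps n m base cs st hg]
    rfl

-- processing the neighbours of one level-d cell preserves the dict part of FInv
theorem fold_inv (maps : List String) (n m : Int) (src : Int × Int) (d : Nat) (x y : Int)
    (hx : Reach maps n m src d (x, y)) :
    ∀ (cs : List (Int × Int)), (∀ c ∈ cs, c ∈ neighborsB x y) →
    ∀ (dist : PySem.Dict (Int × Int) Int) (nx : List (Int × Int)),
      (∀ c ∈ nx, dist.get? c = some ((d : Int) + 1) ∧ MR maps n m src c (d + 1)) →
      (∀ c v, dist.get? c = some v → ∃ k, k ≤ d + 1 ∧ v = (k : Int) ∧ MR maps n m src c k) →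
      (∀ c, dist.get? c = some ((d : Int) + 1) → c ∈ nx) →
      (∀ c k, MR maps n m src c k → k ≤ d → dist.contains c = true) →
      dist.keys.Nodup →
      (let st := cs.foldl (floodCell maps n m ((d : Int) + 1)) (dist, nx)
       (∀ c ∈ st.2, st.1.get? c = some ((d : Int) + 1) ∧ MR maps n m src c (d + 1)) ∧
       (∀ c v, st.1.get? c = some v → ∃ k, k ≤ d + 1 ∧ v = (k : Int) ∧ MR maps n m src c k) ∧
       (∀ c, st.1.get? c = some ((d : Int) + 1) → c ∈ st.2) ∧
       (∀ c k, MR maps n m src c k → k ≤ d → st.1.contains c = true) ∧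
       st.1.keys.Nodup ∧
       (∀ c ∈ cs, adjE maps n m (x, y) c → st.1.contains c = true) ∧
       st.2.length + dist.keys.length = nx.length + st.1.keys.length) := by
  intro cs
  induction cs with
  | nil =>
    intro _ dist nx h1 h2 h3 hC hnd
    exact ⟨h1, h2, h3, hC, hnd, by simp, rfl⟩
  | cons c0 cs ih =>
    intro hcs dist nx h1 h2 h3 hC hnd
    have hc0 : c0 ∈ neighborsB x y := hcs c0 (by simp)
    have hcs' : ∀ c ∈ cs, c ∈ neighborsB x y := fun c hc => hcs c (by simp [hc])
    simp only [List.foldl_cons]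
    by_cases hg : 0 ≤ c0.1 ∧ c0.1 < n ∧ 0 ≤ c0.2 ∧ c0.2 < m ∧
        dist.contains c0 = false ∧ pvCell maps c0.1 c0.2 ≠ 'X'
    · have hstep : floodCell maps n m ((d : Int) + 1) (dist, nx) c0 =
          (dist.insert c0 ((d : Int) + 1), nx ++ [c0]) := by
        unfold floodCell; rw [if_pos hg]
      rw [hstep]
      have hInbc0 : Inb n m c0 := ⟨hg.1, hg.2.1, hg.2.2.1, hg.2.2.2.1⟩
      have hMRc0 : MR maps n m src c0 (d + 1) := by
        refine ⟨Reach.succ hx ⟨hc0, hInbc0, hg.2.2.2.2.2⟩, fun j hj => ?_⟩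
        by_contra hlt
        obtain ⟨k, hk, hmr⟩ := exists_MR_of_reach hj
        have := hC c0 k hmr (by omega)
        rw [hg.2.2.2.2.1] at this
        exact Bool.noConfusion this
      have hget_new : (dist.insert c0 ((d : Int) + 1)).get? c0 = some ((d : Int) + 1) := by
        rw [PySem.Dict.get?_insert, if_pos rfl]
      have h1' : ∀ c ∈ nx ++ [c0],
          (dist.insert c0 ((d : Int) + 1)).get? c = some ((d : Int) + 1) ∧
            MR maps n m src c (d + 1) := by
        intro c hc
        rcases List.mem_append.mp hc with hc | hc
        · obtain ⟨hgv, hmr⟩ := h1 c hc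
          have hne : c ≠ c0 := by
            rintro rfl
            rw [PySem.Dict.contains_eq_isSome_get?, hgv] at hg
            exact absurd hg.2.2.2.2.1 (by simp)
          rw [PySem.Dict.get?_insert, if_neg hne]
          exact ⟨hgv, hmr⟩
        · rw [List.mem_singleton.mp hc]
          exact ⟨hget_new, hMRc0⟩
      have h2' : ∀ c v, (dist.insert c0 ((d : Int) + 1)).get? c = some v →
          ∃ k, k ≤ d + 1 ∧ v = (k : Int) ∧ MR maps n m src c k := by
        intro c v hv
        rw [PySem.Dict.get?_insert] at hv
        split_ifs at hv with hcc
        · cases hv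
          subst hcc
          exact ⟨d + 1, le_refl _, by push_cast; ring, hMRc0⟩
        · exact h2 c v hv
      have h3' : ∀ c, (dist.insert c0 ((d : Int) + 1)).get? c = some ((d : Int) + 1) →
          c ∈ nx ++ [c0] := by
        intro c hv
        rw [PySem.Dict.get?_insert] at hv
        split_ifs at hv with hcc
        · subst hcc; simp
        · exact List.mem_append_left _ (h3 c hv)
      have hC' : ∀ c k, MR maps n m src c k → k ≤ d →
          (dist.insert c0 ((d : Int) + 1)).contains c = true := by
        intro c k hmr hk
        rw [PySem.Dict.contains_insert, hC c k hmr hk, Bool.or_true]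
      have hnd' : (dist.insert c0 ((d : Int) + 1)).keys.Nodup :=
        PySem.Dict.nodup_keys_insert _ _ _ hnd
      obtain ⟨g1, g2, g3, g4, g5, g6, g7⟩ :=
        ih hcs' (dist.insert c0 ((d : Int) + 1)) (nx ++ [c0]) h1' h2' h3' hC' hnd'
      refine ⟨g1, g2, g3, g4, g5, ?_, ?_⟩
      · intro c hc hadj
        rcases List.mem_cons.mp hc with hc | hc
        · subst hc
          exact fold_contains_mono maps n m _ cs _
            (by rw [PySem.Dict.contains_eq_isSome_get?, hget_new]; rfl)
        · exact g6 c hc hadj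
      · have hkeys : (dist.insert c0 ((d : Int) + 1)).keys = dist.keys ++ [c0] :=
          PySem.Dict.keys_insert_of_not_contains _ _ hg.2.2.2.2.1
        rw [hkeys] at g7
        simp only [List.length_append, List.length_singleton] at g7
        omega
    · have hstep : floodCell maps n m ((d : Int) + 1) (dist, nx) c0 = (dist, nx) := by
        unfold floodCell; rw [if_neg hg]
      rw [hstep]
      obtain ⟨g1, g2, g3, g4, g5, g6, g7⟩ := ih hcs' dist nx h1 h2 h3 hC hnd
      refine ⟨g1, g2, g3, g4, g5, ?_, g7⟩
      intro c hc hadj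
      rcases List.mem_cons.mp hc with hc | hc
      · subst hc
        have hcont : dist.contains c = true := by
          obtain ⟨-, hInb, hX⟩ := hadj
          obtain ⟨a, b, e, f⟩ := hInb
          cases hcase : dist.contains c with
          | true => rfl
          | false => exact absurd ⟨a, b, e, f, hcase, hX⟩ hg
        exact fold_contains_mono maps n m _ cs _ hcont
      · exact g6 c hc hadj

-- if no cell has BFS distance d+1, none has any larger distance either
theorem no_MR_above (maps : List String) (n m : Int) (src : Int × Int) (d : Nat)
    (h : ∀ c, ¬ MR maps n m src c (d + 1)) :
    ∀ k, d + 1 ≤ k → ∀ c, ¬ MR maps n m src c k := by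
  intro k
  induction k with
  | zero => omega
  | succ k ih =>
    intro hk c hmr
    by_cases hkd : k = d
    · subst hkd
      exact h c hmr
    · obtain ⟨b, -, hmrb⟩ := MR_pred hmr
      exact ih (by omega) b hmrb

-- the distance dict never holds more than n*m keys
theorem FInv_keys_le (maps : List String) (n m : Int) (src : Int × Int) (d : Nat)
    (frontier nxt : List (Int × Int)) (dist : PySem.Dict (Int × Int) Int)
    (hsrc : Inb n m src) (hI : FInv maps n m src d frontier nxt dist) :
    dist.keys.length ≤ n.toNat * m.toNat := by
  obtain ⟨-, -, h2, -, -, -, hnd⟩ := hI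
  refine nodup_inb_length_le n m _ hnd ?_
  intro c hc
  have hcont : dist.contains c = true := (PySem.Dict.contains_iff_mem_keys dist c).mpr hc
  rw [PySem.Dict.contains_eq_isSome_get?] at hcont
  cases hg : dist.get? c with
  | none => rw [hg] at hcont; exact absurd hcont (by simp)
  | some v =>
    obtain ⟨k, -, -, hmr⟩ := h2 c v hg
    exact MR_inb hsrc hmr

-- the flood loop fills the whole distance table
theorem floodLoop_get? (maps : List String) (n m : Int) (src : Int × Int)
    (hsrc : Inb n m src) :
    ∀ (fuel : Nat) (frontier nxt : List (Int × Int)) (dist : PySem.Dict (Int × Int) Int),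
      (∃ d, FInv maps n m src d frontier nxt dist ∧
        frontier.length + nxt.length + n.toNat * m.toNat ≤ fuel + dist.keys.length) →
      ∀ (c : Int × Int) (v : Int),
        (floodLoop maps n m fuel frontier nxt dist).get? c = some v ↔
          ∃ k : Nat, v = (k : Int) ∧ MR maps n m src c k := by
  intro fuel frontier nxt dist
  induction fuel, frontier, nxt, dist using floodLoop.induct maps n m with
  | case1 fuel dist =>
    rintro ⟨d, hI, -⟩ c v
    rw [floodLoop]
    obtain ⟨hF, hN, h2, h3, hC, hNxt, hnd⟩ := hI
    constructor
    · intro hv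
      obtain ⟨k, -, hkv, hmr⟩ := h2 c v hv
      exact ⟨k, hkv, hmr⟩
    · rintro ⟨k, rfl, hmr⟩
      have hnone : ∀ c', ¬ MR maps n m src c' (d + 1) := by
        intro c' hmr'
        rcases hNxt c' hmr' with h | ⟨b, hb, -⟩
        · exact absurd h (List.not_mem_nil)
        · exact absurd hb (List.not_mem_nil)
      have hkd : k ≤ d := by
        by_contra hgt
        exact no_MR_above maps n m src d hnone k (by omega) c hmr
      have hcont := hC c k hmr hkd
      rw [PySem.Dict.contains_eq_isSome_get?] at hcont
      cases hg : dist.get? c with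
      | none => rw [hg] at hcont; exact absurd hcont (by simp)
      | some w =>
        obtain ⟨k', -, hkv', hmr'⟩ := h2 c w hg
        rw [hkv', MR_unique hmr hmr']
  | case2 fuel dist q qs ih =>
    rintro ⟨d, hI, hf⟩
    rw [floodLoop]
    apply ih
    obtain ⟨hF, hN, h2, h3, hC, hNxt, hnd⟩ := hI
    have hcast : ((d + 1 : Nat) : Int) = (d : Int) + 1 := by push_cast; ring
    refine ⟨d + 1, ⟨?_, ?_, ?_, ?_, ?_, ?_, hnd⟩, ?_⟩
    · intro c hc
      rw [hcast]
      exact hN c hc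
    · intro c hc
      exact absurd hc (List.not_mem_nil)
    · intro c v hv
      obtain ⟨k, hk, hkv, hmr⟩ := h2 c v hv
      exact ⟨k, by omega, hkv, hmr⟩
    · intro c hv
      exfalso
      obtain ⟨k, hk, hkv, -⟩ := h2 c _ hv
      rw [hcast] at hkv
      omega
    · intro c k hmr hk
      rcases Nat.lt_or_ge k (d + 1) with hlt | hge
      · exact hC c k hmr (by omega)
      · have hkd : k = d + 1 := by omega
        subst hkd
        rcases hNxt c hmr with hcq | ⟨b, hb, -⟩
        · have := (hN c hcq).1
          rw [PySem.Dict.contains_eq_isSome_get?, this]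
          rfl
        · exact absurd hb (List.not_mem_nil)
    · intro c hmr
      obtain ⟨b, hadj, hmrb⟩ := MR_pred hmr
      rcases hNxt b hmrb with hbq | ⟨b', hb', -⟩
      · exact Or.inr ⟨b, hbq, hadj⟩
      · exact absurd hb' (List.not_mem_nil)
    · simp only [List.length_cons, List.length_nil] at hf ⊢
      omega
  | case3 nxt dist x y rest =>
    rintro ⟨d, hI, hf⟩ c v
    exfalso
    have hle := FInv_keys_le maps n m src d _ nxt dist hsrc hI
    simp only [List.length_cons] at hf
    omega
  | case4 nxt dist x y rest fuel' base st ih =>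
    rintro ⟨d, hI, hf⟩
    rw [floodLoop]
    obtain ⟨hF, hN, h2, h3, hC, hNxt, hnd⟩ := hI
    obtain ⟨hgxy, hmrxy⟩ := hF (x, y) (by simp)
    have hb : dist.getD (x, y) 0 + 1 = (d : Int) + 1 := by
      rw [PySem.Dict.getD_eq_get?_getD, hgxy]
      rfl
    have hFeq : (neighborsB x y).foldl (floodCell maps n m (dist.getD (x, y) 0 + 1)) (dist, nxt)
        = (neighborsB x y).foldl (floodCell maps n m ((d : Int) + 1)) (dist, nxt) := by
      rw [hb]
    obtain ⟨g1, g2, g3, g4, g5, g6, g7⟩ :=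
      fold_inv maps n m src d x y hmrxy.1 (neighborsB x y) (fun c hc => hc)
        dist nxt hN h2 h3 hC hnd
    have hsteq : st = (neighborsB x y).foldl (floodCell maps n m ((d : Int) + 1)) (dist, nxt) := by
      simp only [st, base]
      rw [hb]
    apply ih
    rw [hsteq]
    refine ⟨d, ⟨?_, g1, g2, g3, g4, ?_, g5⟩, ?_⟩
    · intro c hc
      exact ⟨fold_mono maps n m _ _ _ (hF c (List.mem_cons_of_mem _ hc)).1,
        (hF c (List.mem_cons_of_mem _ hc)).2⟩
    · intro c hmr
      rcases hNxt c hmr with hcn | ⟨b, hb', hadj⟩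
      · left
        exact g3 c (fold_mono maps n m _ _ _ (hN c hcn).1)
      · rcases List.mem_cons.mp hb' with hbxy | hbrest
        · left
          subst hbxy
          have hcont := g6 c hadj.1 hadj
          rw [PySem.Dict.contains_eq_isSome_get?] at hcont
          cases hg : ((neighborsB x y).foldl (floodCell maps n m ((d : Int) + 1))
              (dist, nxt)).1.get? c with
          | none => rw [hg] at hcont; exact absurd hcont (by simp)
          | some w =>
            obtain ⟨k, -, hkv, hmr'⟩ := g2 c w hg
            have hk : k = d + 1 := MR_unique hmr' hmr
            apply g3
            rw [hg, hkv, hk]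
            push_cast
            ring_nf
        · exact Or.inr ⟨b, hbrest, hadj⟩
    · simp only [List.length_cons] at hf
      omega

theorem flood_get? (maps : List String) (n m : Int) (src : Int × Int)
    (hsrc : Inb n m src) (c : Int × Int) (v : Int) :
    (flood maps n m src).get? c = some v ↔
      ∃ k : Nat, v = (k : Int) ∧ MR maps n m src c k := by
  unfold flood
  apply floodLoop_get? maps n m src hsrc
  have h0 : PySem.Dict.ofList [(src, (0 : Int))] = PySem.Dict.empty.insert src 0 := rfl
  have hMR0 : MR maps n m src src 0 := ⟨Reach.zero, fun j _ => Nat.zero_le j⟩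
  refine ⟨0, ⟨?_, ?_, ?_, ?_, ?_, ?_, ?_⟩, ?_⟩
  · intro c' hc
    have hcs : c' = src := by simpa using hc
    subst hcs
    rw [h0, PySem.Dict.get?_insert, if_pos rfl]
    exact ⟨by norm_num, hMR0⟩
  · intro c' hc
    exact absurd hc List.not_mem_nil
  · intro c' v' hv
    rw [h0, PySem.Dict.get?_insert] at hv
    split_ifs at hv with hcs
    · cases hv
      subst hcs
      exact ⟨0, by omega, by norm_num, hMR0⟩
    · rw [PySem.Dict.get?_empty] at hv
      exact absurd hv (by simp)
  · intro c' hv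
    rw [h0, PySem.Dict.get?_insert] at hv
    split_ifs at hv with hcs
    · exact absurd hv (by simp)
    · rw [PySem.Dict.get?_empty] at hv
      exact absurd hv (by simp)
  · intro c' k hmr hk
    have hk0 : k = 0 := by omega
    subst hk0
    have hcs : c' = src := reach_zero hmr.1
    subst hcs
    rw [h0, PySem.Dict.contains_insert]
    simp
  · intro c' hmr
    obtain ⟨b, hadj, hmrb⟩ := MR_pred hmr
    have hbs : b = src := reach_zero hmrb.1
    subst hbs
    exact Or.inr ⟨b, by simp, hadj⟩
  · rw [h0]
    exact PySem.Dict.nodup_keys_insert _ _ _ PySem.Dict.nodup_keys_empty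
  · rw [h0, PySem.Dict.keys_insert_of_not_contains _ _ (by rw [PySem.Dict.contains_empty])]
    simp
    omega

-- the key symmetry: one flood from e reads the same leg value as a flood from s
theorem pvInterp_symm (maps : List String) (n m : Int) (s e : Int × Int)
    (hs : Inb n m s) (he : Inb n m e)
    (hsX : pvCell maps s.1 s.2 ≠ 'X') (heX : pvCell maps e.1 e.2 ≠ 'X') :
    pvInterp e (flood maps n m s) = pvInterp s (flood maps n m e) := by
  unfold pvInterp
  cases h1 : (flood maps n m s).get? e with
  | some v =>
    obtain ⟨k, hkv, hmr⟩ := (flood_get? maps n m s hs e v).mp h1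
    rw [(flood_get? maps n m e he s v).mpr ⟨k, hkv, MR_symm ⟨hs, hsX⟩ ⟨he, heX⟩ hmr⟩]
  | none =>
    cases h2 : (flood maps n m e).get? s with
    | none => rfl
    | some w =>
      obtain ⟨k, hkv, hmr⟩ := (flood_get? maps n m e he s w).mp h2
      have h3 := (flood_get? maps n m s hs e w).mpr
        ⟨k, hkv, MR_symm ⟨he, heX⟩ ⟨hs, hsX⟩ hmr⟩
      rw [h1] at h3
      cases h3

-- ===== VERDICT (by name: the statement is the Claim_ definition above) =====
theorem solution_spec : Claim_equal_solution := by
  intro maps hdom hpre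
  obtain ⟨hne0, hlong, hSin, hLin, hEin⟩ := hpre
  unfold Spec_solution solution solution_alt
  dsimp only
  obtain ⟨⟨hRS, hRL, hRE⟩, hGS, hGL, hGE⟩ := scan_sim maps hlong
  rw [hRS, hRL, hRE]
  cases hA : scanA maps (maps.length : Int)
      ((PySem.List.pyGetD maps 0 "").toList.length : Int) with
  | mk o1 o23 =>
    obtain ⟨o2, o3⟩ := o23
    rw [hA] at hRS hRL hRE hGS hGL hGE
    cases o1 with
    | none => rfl
    | some sp =>
      cases o2 with
      | none => rfl
      | some lp =>
        cases o3 with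
        | none => rfl
        | some ep =>
          have hgs := hGS sp rfl
          have hgl := hGL lp rfl
          have hge := hGE ep rfl
          have hls : lp ≠ sp := by
            intro h
            have hx := hgl.2
            rw [h, hgs.2] at hx
            exact absurd hx (by decide)
          have hel : ep ≠ lp := by
            intro h
            have hx := hge.2
            rw [h, hgl.2] at hx
            exact absurd hx (by decide)
          dsimp only
          rw [finding_eq_flood maps sp lp hgs.1 hls,
            finding_eq_flood maps lp ep hgl.1 hel,
            pvInterp_symm maps _ _ sp lp hgs.1 hgl.1
              (by rw [hgs.2]; decide) (by rw [hgl.2]; decide)]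
          have hchar := flood_get? maps (maps.length : Int)
            ((PySem.List.pyGetD maps 0 "").toList.length : Int) lp hgl.1
          cases hfs : (flood maps (maps.length : Int)
              ((PySem.List.pyGetD maps 0 "").toList.length : Int) lp).get? sp with
          | none =>
            have hcs : (flood maps (maps.length : Int)
                ((PySem.List.pyGetD maps 0 "").toList.length : Int) lp).contains sp = false := by
              rw [PySem.Dict.contains_eq_isSome_get?, hfs]
              rfl
            have hps : pvInterp sp (flood maps (maps.length : Int)
                ((PySem.List.pyGetD maps 0 "").toList.length : Int) lp) = -1 := by
              rw [pvInterp, hfs]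
            rw [hps, hcs, if_pos (Or.inl rfl), if_pos (Or.inl rfl)]
          | some a =>
            obtain ⟨k, hkv, hmrk⟩ := (hchar sp a).mp hfs
            have hcs : (flood maps (maps.length : Int)
                ((PySem.List.pyGetD maps 0 "").toList.length : Int) lp).contains sp = true := by
              rw [PySem.Dict.contains_eq_isSome_get?, hfs]
              rfl
            have hps : pvInterp sp (flood maps (maps.length : Int)
                ((PySem.List.pyGetD maps 0 "").toList.length : Int) lp) = a := by
              rw [pvInterp, hfs]
            cases hfe : (flood maps (maps.length : Int)
                ((PySem.List.pyGetD maps 0 "").toList.length : Int) lp).get? ep with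
            | none =>
              have hce : (flood maps (maps.length : Int)
                  ((PySem.List.pyGetD maps 0 "").toList.length : Int) lp).contains ep = false := by
                rw [PySem.Dict.contains_eq_isSome_get?, hfe]
                rfl
              have hpe : pvInterp ep (flood maps (maps.length : Int)
                  ((PySem.List.pyGetD maps 0 "").toList.length : Int) lp) = -1 := by
                rw [pvInterp, hfe]
              rw [hpe, hce, if_pos (Or.inr rfl), if_pos (Or.inr rfl)]
            | some b =>
              obtain ⟨j, hjv, hmrj⟩ := (hchar ep b).mp hfe
              have hce : (flood maps (maps.length : Int)
                  ((PySem.List.pyGetD maps 0 "").toList.length : Int) lp).contains ep = true := by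
                rw [PySem.Dict.contains_eq_isSome_get?, hfe]
                rfl
              have hpe : pvInterp ep (flood maps (maps.length : Int)
                  ((PySem.List.pyGetD maps 0 "").toList.length : Int) lp) = b := by
                rw [pvInterp, hfe]
              rw [hps, hpe, hcs, hce,
                if_neg (by rw [hkv, hjv]; rintro (h | h) <;> omega),
                if_neg (by simp),
                PySem.Dict.getD_eq_get?_getD, PySem.Dict.getD_eq_get?_getD, hfs, hfe]
              rfl
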